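-- pv_equiv track=rewrite | github.com/adrianip03/braille-recognition-api | app/helper.py | get_boxes_offset
-- ===== SOURCE A (Python) =====
-- WINDOW_PERCENTAGE = 0.4
--
-- WINDOW_NUM = 3
--
-- def get_boxes_offset(original_size):
--     image_width, image_height = original_size
--     window_height = round(image_height * WINDOW_PERCENTAGE)
--     window_width = round(image_width * WINDOW_PERCENTAGE)
--
--     window_shift_vertical = round(image_height / float(WINDOW_NUM))
--     window_shift_horizontal = round(image_width / float(WINDOW_NUM))
--
--     offset_list = []
--
--     for i in range(WINDOW_NUM):
--         y_offest = i * window_shift_vertical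
--         for j in range(WINDOW_NUM):
--             x_offset = j * window_shift_horizontal
--
--             y_start = min(y_offest, image_height - window_height)
--             x_start = min(x_offset, image_width - window_width)
--
--             offset = (x_start, y_start)
--             offset_list.append(offset)
--
--     return offset_list
-- ===== SOURCE B (Python) =====
-- WINDOW_PERCENTAGE = 0.4
--
-- WINDOW_NUM = 3
--
-- def get_boxes_offset(original_size):
--     image_width, image_height = original_size
--     window_height = round(image_height * WINDOW_PERCENTAGE)
--     window_width = round(image_width * WINDOW_PERCENTAGE)
--
--     window_shift_vertical = round(image_height / float(WINDOW_NUM))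
--     window_shift_horizontal = round(image_width / float(WINDOW_NUM))
--
--     def cell(k):
--         # flat cell index k in row-major order: row i = k // 3, column j = k % 3
--         i, j = divmod(k, WINDOW_NUM)
--         return (min(j * window_shift_horizontal, image_width - window_width),
--                 min(i * window_shift_vertical, image_height - window_height))
--
--     def build(k):
--         if k >= WINDOW_NUM * WINDOW_NUM:
--             return []
--         return [cell(k)] + build(k + 1)
--
--     return build(0)
-- ===== Notes on version B (the rewrite author's own statement) =====
-- stated objective: alternative
-- what changed: Replaces the nested i/j loops appending to an accumulator with a recursive builder over a single flat cell index k in range(9), recovering (row, column) by divmod(k, 3) and consing cells front-to-back.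
import Mathlib
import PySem

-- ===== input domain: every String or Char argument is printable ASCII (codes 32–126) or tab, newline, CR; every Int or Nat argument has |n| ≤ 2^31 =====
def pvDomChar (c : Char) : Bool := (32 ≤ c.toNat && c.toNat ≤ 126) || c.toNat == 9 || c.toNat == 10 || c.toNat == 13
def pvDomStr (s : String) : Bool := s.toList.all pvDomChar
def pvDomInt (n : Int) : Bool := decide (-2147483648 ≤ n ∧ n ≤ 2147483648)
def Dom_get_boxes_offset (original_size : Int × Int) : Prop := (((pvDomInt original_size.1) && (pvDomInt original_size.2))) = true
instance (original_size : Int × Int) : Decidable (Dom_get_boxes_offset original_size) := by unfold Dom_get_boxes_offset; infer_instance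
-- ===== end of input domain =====

-- B builds the same 9 offsets by recursion over one flat cell index with divmod instead of nested loops (alternative decomposition).

-- round(n * 0.4) for an int n, hand-ported: exact for |n| ≤ 2^31 (the exact value 2n/5 is never a
-- half-integer, its distance to one is ≥ 0.1, and the double error is < 1e-6 there, so Python's
-- float round-half-even equals the nearest integer to 2n/5).
def pvRound04 (n : Int) : Int := PySem.Int.floordiv (4 * n + 5) 10

-- round(n / 3.0) for an int n, hand-ported: exact for |n| ≤ 2^31 (n/3 is never a half-integer,
-- distance ≥ 1/6, double error far below; nearest integer to n/3).
def pvRoundDiv3 (n : Int) : Int := PySem.Int.floordiv (2 * n + 3) 6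

-- ===== PORT A =====
def get_boxes_offset (original_size : Int × Int) : List (Int × Int) :=
  let image_width := original_size.1
  let image_height := original_size.2
  let window_height := pvRound04 image_height
  let window_width := pvRound04 image_width
  let window_shift_vertical := pvRoundDiv3 image_height
  let window_shift_horizontal := pvRoundDiv3 image_width
  (PySem.List.pyRange 0 3 1).foldl (fun offset_list i =>
    let y_offest := i * window_shift_vertical
    (PySem.List.pyRange 0 3 1).foldl (fun offset_list j =>
      let x_offset := j * window_shift_horizontal
      let y_start := min y_offest (image_height - window_height)
      let x_start := min x_offset (image_width - window_width)
      offset_list ++ [(x_start, y_start)]) offset_list) []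

-- ===== PORT B =====
-- helper for B: the recursive builder 'build' over the flat cell index (fuel = 9 - k)
def pvBuild (cell : Int → Int × Int) (k : Nat) : List (Int × Int) :=
  if k ≥ 9 then []
  else cell (Int.ofNat k) :: pvBuild cell (k + 1)
termination_by 9 - k

def get_boxes_offset_alt (original_size : Int × Int) : List (Int × Int) :=
  let image_width := original_size.1
  let image_height := original_size.2
  let window_height := pvRound04 image_height
  let window_width := pvRound04 image_width
  let window_shift_vertical := pvRoundDiv3 image_height
  let window_shift_horizontal := pvRoundDiv3 image_width
  let cell := fun (k : Int) =>
    let i := PySem.Int.floordiv k 3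
    let j := PySem.Int.mod k 3
    (min (j * window_shift_horizontal) (image_width - window_width),
     min (i * window_shift_vertical) (image_height - window_height))
  pvBuild cell 0

-- ===== PRECONDITION & SPEC =====
def Spec_get_boxes_offset (original_size : Int × Int) (out : List (Int × Int)) : Prop := out = get_boxes_offset_alt original_size
instance (original_size : Int × Int) (out : List (Int × Int)) : Decidable (Spec_get_boxes_offset original_size out) := by unfold Spec_get_boxes_offset; infer_instance

-- ===== CLAIM (what is proved, stated in full; the proofs are below) =====
def Claim_equal_get_boxes_offset : Prop := ∀ (original_size : Int × Int), Dom_get_boxes_offset original_size → Spec_get_boxes_offset original_size (get_boxes_offset original_size)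

-- ===== LEMMAS AND PROOFS =====
theorem pvRange3 : PySem.List.pyRange 0 3 1 = [0, 1, 2] := by
  simp [PySem.List.pyRange_one, List.range_succ]

theorem pvBuild_eq (cell : Int → Int × Int) :
    pvBuild cell 0 = [cell 0, cell 1, cell 2, cell 3, cell 4, cell 5, cell 6, cell 7, cell 8] := by
  rw [pvBuild, pvBuild, pvBuild, pvBuild, pvBuild, pvBuild, pvBuild, pvBuild, pvBuild, pvBuild]
  norm_num

-- ===== VERDICT (by name: the statement is the Claim_ definition above) =====
theorem get_boxes_offset_spec : Claim_equal_get_boxes_offset := by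
  intro p _
  unfold Spec_get_boxes_offset get_boxes_offset get_boxes_offset_alt
  rw [pvRange3]
  simp only [List.foldl]
  rw [pvBuild_eq]
  norm_num [show (PySem.Int.floordiv 0 3 : Int) = 0 from by decide,
            show (PySem.Int.floordiv 1 3 : Int) = 0 from by decide,
            show (PySem.Int.floordiv 2 3 : Int) = 0 from by decide,
            show (PySem.Int.floordiv 3 3 : Int) = 1 from by decide,
            show (PySem.Int.floordiv 4 3 : Int) = 1 from by decide,
            show (PySem.Int.floordiv 5 3 : Int) = 1 from by decide,
            show (PySem.Int.floordiv 6 3 : Int) = 2 from by decide,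
            show (PySem.Int.floordiv 7 3 : Int) = 2 from by decide,
            show (PySem.Int.floordiv 8 3 : Int) = 2 from by decide,
            show (PySem.Int.mod 0 3 : Int) = 0 from by decide,
            show (PySem.Int.mod 1 3 : Int) = 1 from by decide,
            show (PySem.Int.mod 2 3 : Int) = 2 from by decide,
            show (PySem.Int.mod 3 3 : Int) = 0 from by decide,
            show (PySem.Int.mod 4 3 : Int) = 1 from by decide,
            show (PySem.Int.mod 5 3 : Int) = 2 from by decide,
            show (PySem.Int.mod 6 3 : Int) = 0 from by decide,
            show (PySem.Int.mod 7 3 : Int) = 1 from by decide,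
            show (PySem.Int.mod 8 3 : Int) = 2 from by decide]
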